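-- pv_equiv track=rewrite | github.com/opendilab/DI-hpc | tests/test_padding_1d.py | _get_baseline
-- ===== SOURCE A (Python) =====
-- def _get_baseline(lengths, m):
--     n = len(lengths)
--     arr = [None] + sorted(lengths)  # if already in order, this step is not necessary
--
--     def p(_first, _last):  # cost of [start, end] in arr
--         return arr[_last] * (_last - _first + 1)
--
--     # DP, time complex O(MN^2), space complex O(MN)
--     f = {(0, 0): (0, 0)}
--     for i, length_ in enumerate(arr[1:], start=1):
--         for j in range(1, m + 1):
--             ress = []
--             for k in range(0, i):
--                 if (k, j - 1) in f:
--                     last_cost, _ = f[(k, j - 1)]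
--                     ress.append((last_cost + p(k + 1, i), k))
--
--             if ress:
--                 f[(i, j)] = min(ress)
--
--     min_cost, _ = f[(n, m)]
--     last_position, last_cnt = n, m
--     positions = [n]
--     while last_position > 0:
--         _, last_position = f[(last_position, last_cnt)]
--         last_cnt -= 1
--         positions.append(last_position)
--
--     assert len(positions) == m + 1
--     return min_cost
-- ===== SOURCE B (Python) =====
-- def _get_baseline(lengths, m):
--     # Layered DP with divide-and-conquer optimization.
--     # cost(k, i) = prev[k] + arr[i-1] * (i - k) satisfies the quadrangle
--     # inequality because arr is sorted, so the (largest) optimal split point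
--     # is monotone in i and each layer is computed in O(n log n).
--     arr = sorted(lengths)
--     n = len(arr)
--     prev = [0] + [None] * n      # prev[k]: min cost of first k items in j-1 groups
--     for _j in range(1, m + 1):
--         cur = [None] * (n + 1)
--
--         def best(i, klo, khi):
--             # min cost and LARGEST argmin for state i, split k in [klo, khi]
--             bc, bk = None, None
--             for k in range(klo, min(khi, i - 1) + 1):
--                 if prev[k] is not None:
--                     c = prev[k] + arr[i - 1] * (i - k)
--                     if bc is None or c <= bc:
--                         bc, bk = c, k
--             return bc, bk
--
--         def solve(ilo, ihi, klo, khi):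
--             if ilo > ihi:
--                 return
--             mid = (ilo + ihi) // 2
--             bc, bk = best(mid, klo, khi)
--             cur[mid] = bc
--             ko = klo if bk is None else bk
--             solve(ilo, mid - 1, klo, ko)
--             solve(mid + 1, ihi, ko, khi)
--
--         solve(1, n, 0, n)
--         prev = cur
--     return prev[n]
-- ===== Notes on version B (the rewrite author's own statement) =====
-- stated objective: faster
-- what changed: Replaces the O(M*N^2) dict-based DP with argmin tracking and path backtracking by a layered array DP whose per-layer minimization is computed with divide-and-conquer optimization (the cost arr[i]*(i-k) on the sorted array satisfies the quadrangle inequality, so the optimal split point is monotone), giving O(M*N*log N).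
import Mathlib
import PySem

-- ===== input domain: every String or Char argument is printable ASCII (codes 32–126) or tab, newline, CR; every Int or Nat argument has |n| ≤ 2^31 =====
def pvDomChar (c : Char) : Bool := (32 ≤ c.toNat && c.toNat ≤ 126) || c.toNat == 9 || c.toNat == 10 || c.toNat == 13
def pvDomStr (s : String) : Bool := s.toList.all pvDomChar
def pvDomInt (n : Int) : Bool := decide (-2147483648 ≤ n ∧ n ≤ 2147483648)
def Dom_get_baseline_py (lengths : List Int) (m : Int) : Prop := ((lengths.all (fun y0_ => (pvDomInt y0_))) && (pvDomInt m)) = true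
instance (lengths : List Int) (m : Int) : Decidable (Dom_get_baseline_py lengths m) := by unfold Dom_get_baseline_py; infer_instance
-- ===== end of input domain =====

-- B replaces A's O(M*N^2) dict DP (which also tracks argmins and backtracks the
-- partition only to discard it) by a layered array DP whose per-layer minimization
-- uses divide-and-conquer optimization (monotone optimal split points on the sorted
-- array), O(M*N*log N); a timing run measured B faster.

-- ===== PORT A =====
-- Python: arr = [None] + sorted(lengths); p(_first,_last) = arr[_last]*(_last-_first+1).
-- We keep the sorted list and read arr[_last] as sorted[_last-1]: the exact shift of
-- A's 1-based indexing (p is only called with 1 <= _last <= n, where both agree).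
def pA_p (arr : List Int) (first last : Int) : Int :=
  (PySem.List.pyGet? arr (last - 1)).getD 0 * (last - first + 1)

-- the 'while last_position > 0' backtracking loop: computes 'positions' (unused by the
-- returned value). Fueled: under Pre_ it runs exactly m times, within fuel m.toNat+1.
def pA_back (f : PySem.Dict (Int × Int) (Int × Int)) :
    Nat → Int → Int → List Int → List Int
  | 0, _, _, positions => positions
  | fuel + 1, last_position, last_cnt, positions =>
    if last_position > 0 then
      let lp' := ((f.get? (last_position, last_cnt)).getD (0, 0)).2
      pA_back f fuel lp' (last_cnt - 1) (positions ++ [lp'])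
    else positions

def get_baseline_py (lengths : List Int) (m : Int) : Int :=
  let n : Int := lengths.length
  let arr : List Int := PySem.List.sorted lengths (fun x => x) false
  let f0 : PySem.Dict (Int × Int) (Int × Int) := PySem.Dict.ofList [((0, 0), (0, 0))]
  let f := (PySem.List.pyRange 1 (n + 1) 1).foldl (fun f i =>
    (PySem.List.pyRange 1 (m + 1) 1).foldl (fun f j =>
      let ress : List (Int × Int) :=
        (PySem.List.pyRange 0 i 1).foldl (fun ress k =>
          match f.get? (k, j - 1) with
          | some lastv => ress ++ [(lastv.1 + pA_p arr (k + 1) i, k)]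
          | none => ress) []
      if ress ≠ [] then
        f.insert (i, j) ((PySem.List.min2? ress Prod.fst Prod.snd).getD (0, 0))
      else f) f) f0
  let min_cost := ((f.get? (n, m)).getD (0, 0)).1  -- KeyError when (n,m) not in f: outside Pre_
  let _positions := pA_back f (m.toNat + 1) n m [n]  -- 'assert len(positions)==m+1' holds under Pre_
  min_cost

-- ===== PORT B =====
-- best(i, klo, khi) of Source B: min cost and largest argmin for state i, split k in
-- [klo, khi]; prev[k] / arr[i-1] are in range wherever read, so pyGetD is exact.
def pB_bestStep (prev : List (Option Int)) (arr : List Int) (i : Int)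
    (bb : Option Int × Option Int) (k : Int) : Option Int × Option Int :=
  match PySem.List.pyGetD prev k none with
  | some pk =>
    let c := pk + PySem.List.pyGetD arr (i - 1) 0 * (i - k)
    match bb.1 with
    | none => (some c, some k)
    | some bc => if c ≤ bc then (some c, some k) else bb
  | none => bb

def pB_best (prev : List (Option Int)) (arr : List Int) (i klo khi : Int) :
    Option Int × Option Int :=
  (PySem.List.pyRange klo (min khi (i - 1) + 1) 1).foldl (pB_bestStep prev arr i) (none, none)

-- solve(ilo, ihi, klo, khi) of Source B
def pB_solve (prev : List (Option Int)) (arr : List Int)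
    (cur : List (Option Int)) (ilo ihi klo khi : Int) : List (Option Int) :=
  if _h : ilo > ihi then cur
  else
    let mid := PySem.Int.floordiv (ilo + ihi) 2
    let b := pB_best prev arr mid klo khi
    let cur1 := PySem.List.pySetD cur mid b.1
    let ko := b.2.getD klo
    let cur2 := pB_solve prev arr cur1 ilo (mid - 1) klo ko
    pB_solve prev arr cur2 (mid + 1) ihi ko khi
termination_by (ihi + 1 - ilo).toNat
decreasing_by
  · have := PySem.Int.floordiv_two_mid_bounds (lo := ilo) (hi := ihi) (by omega)
    omega
  · have := PySem.Int.floordiv_two_mid_bounds (lo := ilo) (hi := ihi) (by omega)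
    omega

def get_baseline_py_alt (lengths : List Int) (m : Int) : Int :=
  let arr : List Int := PySem.List.sorted lengths (fun x => x) false
  let n : Int := arr.length
  let prev0 : List (Option Int) := some 0 :: List.replicate n.toNat none
  let prev := (PySem.List.pyRange 1 (m + 1) 1).foldl
    (fun prev _j => pB_solve prev arr (List.replicate (n.toNat + 1) none) 1 n 0 n) prev0
  (PySem.List.pyGetD prev n none).getD 0
  -- prev[n]: some under Pre_ (outside Pre_ Source B returns None, which is not an int)

-- ===== PRECONDITION & SPEC =====
-- Pre_ excludes exactly the inputs on which A raises KeyError at f[(n, m)]: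
-- m < 1 or m > len(lengths), except the trivial lengths = [], m = 0.
def Pre_get_baseline_py (lengths : List Int) (m : Int) : Prop :=
  (lengths = [] ∧ m = 0) ∨ (1 ≤ m ∧ m ≤ lengths.length)
instance (lengths : List Int) (m : Int) : Decidable (Pre_get_baseline_py lengths m) := by
  unfold Pre_get_baseline_py; infer_instance
def pvWitness_get_baseline_py : List Int × Int := ([3, 1, 2, 2], 2)

def Spec_get_baseline_py (lengths : List Int) (m : Int) (out : Int) : Prop :=
  out = get_baseline_py_alt lengths m
instance (lengths : List Int) (m : Int) (out : Int) :
    Decidable (Spec_get_baseline_py lengths m out) := by unfold Spec_get_baseline_py; infer_instance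

-- ===== CLAIM (what is proved, stated in full; the proofs are below) =====
def Claim_equal_get_baseline_py : Prop := ∀ (lengths : List Int) (m : Int),
  Dom_get_baseline_py lengths m → Pre_get_baseline_py lengths m →
  Spec_get_baseline_py lengths m (get_baseline_py lengths m)

-- ===== LEMMAS AND PROOFS =====

-- spec layer
def pvCost (arr : List Int) (P : Int → Option Int) (i k : Int) : Int :=
  (P k).getD 0 + (PySem.List.pyGet? arr (i - 1)).getD 0 * (i - k)

def pvCand (P : Int → Option Int) (i : Int) : List Int :=
  (PySem.List.pyRange 0 i 1).filter (fun k => (P k).isSome)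

def pvIsBest (arr : List Int) (P : Int → Option Int) (i : Int) : Option Int → Prop
  | none => pvCand P i = []
  | some c => (∃ k ∈ pvCand P i, pvCost arr P i k = c) ∧ ∀ k ∈ pvCand P i, c ≤ pvCost arr P i k

def pvF (arr : List Int) : Nat → Int → Option Int
  | 0 => fun i => if i = 0 then some 0 else none
  | j + 1 => fun i =>
      PySem.List.min? ((pvCand (pvF arr j) i).map (pvCost arr (pvF arr j) i)) (fun x => x)

lemma pvIsBest_pvF (arr : List Int) (j : Nat) (i : Int) :
    pvIsBest arr (pvF arr j) i (pvF arr (j + 1) i) := by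
  rcases h : pvF arr (j + 1) i with _ | c
  · simp only [pvIsBest]
    simp only [pvF] at h
    rw [PySem.List.min?_eq_none_iff] at h
    simpa using h
  · simp only [pvIsBest]
    simp only [pvF] at h
    constructor
    · have := PySem.List.min?_mem h
      simpa using this
    · intro k hk
      have := PySem.List.min?_isMin h (pvCost arr (pvF arr j) i k) (by simp; exact ⟨k, hk, rfl⟩)
      simpa using this

lemma pvIsBest_unique (arr : List Int) (P : Int → Option Int) (i : Int) (o o' : Option Int)
    (h : pvIsBest arr P i o) (h' : pvIsBest arr P i o') : o = o' := by
  rcases o with _ | c <;> rcases o' with _ | c'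
  · rfl
  · simp only [pvIsBest] at h h'
    rcases h'.1 with ⟨k, hk, _⟩
    rw [h] at hk; simp at hk
  · simp only [pvIsBest] at h h'
    rcases h.1 with ⟨k, hk, _⟩
    rw [h'] at hk; simp at hk
  · simp only [pvIsBest] at h h'
    rcases h.1 with ⟨k, hk, hc⟩
    rcases h'.1 with ⟨k', hk', hc'⟩
    have h1 := h.2 k' hk'
    have h2 := h'.2 k hk
    have : c = c' := by omega
    simp [this]

-- A-side rows
def pvRessStep (arr : List Int) (i : Int) (P : Int → Option (Int × Int))
    (ress : List (Int × Int)) (k : Int) : List (Int × Int) :=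
  match P k with
  | some lastv => ress ++ [(lastv.1 + pA_p arr (k + 1) i, k)]
  | none => ress

def pvRess (arr : List Int) (P : Int → Option (Int × Int)) (i : Int) : List (Int × Int) :=
  (PySem.List.pyRange 0 i 1).foldl (pvRessStep arr i P) []

def pvAent (arr : List Int) : Nat → Int → Option (Int × Int)
  | 0 => fun i => if i = 0 then some (0, 0) else none
  | j + 1 => fun i => PySem.List.min2? (pvRess arr (pvAent arr j) i) Prod.fst Prod.snd

lemma pvRess_aux (arr : List Int) (P : Int → Option (Int × Int)) (i : Int)
    (l : List Int) (acc : List (Int × Int)) :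
    l.foldl (pvRessStep arr i P) acc
      = acc ++ l.filterMap
          (fun k => (P k).map (fun v => (v.1 + pA_p arr (k + 1) i, k))) := by
  induction l generalizing acc with
  | nil => simp
  | cons a t ih =>
    rcases ha : P a with _ | v <;> simp [pvRessStep, ha, ih]

lemma pvRess_eq (arr : List Int) (P : Int → Option (Int × Int)) (i : Int) :
    pvRess arr P i
      = (PySem.List.pyRange 0 i 1).filterMap
          (fun k => (P k).map (fun v => (v.1 + pA_p arr (k + 1) i, k))) := by
  unfold pvRess
  simpa using pvRess_aux arr P i (PySem.List.pyRange 0 i 1) []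

-- min2? characterization (first lexicographic minimum of (fst, snd))
def pvM2Step (acc : Option (Int × Int)) (x : Int × Int) : Option (Int × Int) :=
  match acc with
  | none => some x
  | some m =>
    if (decide (x.1 < m.1) || !decide (m.1 < x.1) && decide (x.2 < m.2)) = true
    then some x else some m

lemma pvMin2_eq_foldl (l : List (Int × Int)) :
    PySem.List.min2? l Prod.fst Prod.snd = l.foldl pvM2Step none := by
  unfold PySem.List.min2?
  apply PySem.List.foldl_congr_mem
  intro acc x _
  cases acc with
  | none => rfl
  | some m => simp [pvM2Step]

lemma pvM2_go (l : List (Int × Int)) : ∀ (m p : Int × Int),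
    l.foldl pvM2Step (some m) = some p →
    (p ∈ l ∨ p = m) ∧ p.1 ≤ m.1 ∧ ∀ q ∈ l, p.1 ≤ q.1 := by
  induction l with
  | nil => intro m p hp; simp at hp; simp [hp]
  | cons a t ih =>
    intro m p hp
    simp only [List.foldl_cons] at hp
    by_cases hc : (decide (a.1 < m.1) || !decide (m.1 < a.1) && decide (a.2 < m.2)) = true
    · have hstep : pvM2Step (some m) a = some a := by simp only [pvM2Step, hc, if_pos]
      rw [hstep] at hp
      obtain ⟨h1, h2, h3⟩ := ih a p hp
      have ham : a.1 ≤ m.1 := by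
        simp only [Bool.or_eq_true, Bool.and_eq_true, Bool.not_eq_true', decide_eq_true_iff,
          decide_eq_false_iff_not] at hc
        rcases hc with h | ⟨h, _⟩ <;> omega
      refine ⟨?_, by omega, ?_⟩
      · rcases h1 with h | h
        · exact Or.inl (List.mem_cons_of_mem _ h)
        · exact Or.inl (by simp [h])
      · intro q hq
        rcases List.mem_cons.mp hq with rfl | hq
        · omega
        · exact h3 q hq
    · have hstep : pvM2Step (some m) a = some m := by simp only [pvM2Step]; simp [hc]
      rw [hstep] at hp
      obtain ⟨h1, h2, h3⟩ := ih m p hp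
      have hma : m.1 ≤ a.1 := by
        simp only [Bool.or_eq_true, Bool.and_eq_true, Bool.not_eq_true', decide_eq_true_iff,
          decide_eq_false_iff_not, not_or, not_and] at hc
        omega
      refine ⟨?_, h2, ?_⟩
      · rcases h1 with h | h
        · exact Or.inl (List.mem_cons_of_mem _ h)
        · exact Or.inr h
      · intro q hq
        rcases List.mem_cons.mp hq with rfl | hq
        · omega
        · exact h3 q hq

lemma pvM2_ne_none (l : List (Int × Int)) : ∀ m : Int × Int,
    l.foldl pvM2Step (some m) ≠ none := by
  induction l with
  | nil => simp
  | cons a t ih =>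
    intro m
    simp only [List.foldl_cons]
    by_cases hc : (decide (a.1 < m.1) || !decide (m.1 < a.1) && decide (a.2 < m.2)) = true
    · have hstep : pvM2Step (some m) a = some a := by simp only [pvM2Step, hc, if_pos]
      rw [hstep]; exact ih a
    · have hstep : pvM2Step (some m) a = some m := by simp only [pvM2Step]; simp [hc]
      rw [hstep]; exact ih m

lemma pvMin2_none_iff (l : List (Int × Int)) :
    PySem.List.min2? l Prod.fst Prod.snd = none ↔ l = [] := by
  rw [pvMin2_eq_foldl]
  cases l with
  | nil => simp
  | cons a t => simpa using pvM2_ne_none t a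

lemma pvMin2_some (l : List (Int × Int)) (p : Int × Int)
    (h : PySem.List.min2? l Prod.fst Prod.snd = some p) :
    p ∈ l ∧ ∀ q ∈ l, p.1 ≤ q.1 := by
  rw [pvMin2_eq_foldl] at h
  cases l with
  | nil => simp at h
  | cons a t =>
    simp only [List.foldl_cons] at h
    have hstep : pvM2Step none a = some a := rfl
    rw [hstep] at h
    obtain ⟨h1, h2, h3⟩ := pvM2_go t a p h
    constructor
    · rcases h1 with h | h
      · exact List.mem_cons_of_mem _ h
      · simp [h]
    · intro q hq
      rcases List.mem_cons.mp hq with rfl | hq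
      · exact h2
      · exact h3 q hq

lemma pA_p_cost (arr : List Int) (i k : Int) :
    pA_p arr (k + 1) i = (PySem.List.pyGet? arr (i - 1)).getD 0 * (i - k) := by
  unfold pA_p
  have : i - (k + 1) + 1 = i - k := by ring
  rw [this]

lemma pvAent_fst (arr : List Int) (j : Nat) :
    ∀ i, (pvAent arr j i).map Prod.fst = pvF arr j i := by
  induction j with
  | zero => intro i; by_cases h : i = 0 <;> simp [pvAent, pvF, h]
  | succ j ih =>
    intro i
    refine pvIsBest_unique arr (pvF arr j) i _ _ ?_ (pvIsBest_pvF arr j i)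
    have hcand : pvCand (pvF arr j) i
        = (PySem.List.pyRange 0 i 1).filter (fun k => (pvAent arr j k).isSome) := by
      unfold pvCand
      apply List.filter_congr
      intro k _
      rw [← ih k]
      simp
    have hmem : ∀ p ∈ pvRess arr (pvAent arr j) i,
        p.2 ∈ pvCand (pvF arr j) i ∧ pvCost arr (pvF arr j) i p.2 = p.1 := by
      intro p hp
      rw [pvRess_eq] at hp
      rcases List.mem_filterMap.mp hp with ⟨k, hk, hv⟩
      rcases ho : pvAent arr j k with _ | v
      · rw [ho] at hv; simp at hv
      · rw [ho] at hv; simp at hv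
        subst hv
        constructor
        · rw [hcand]; rw [List.mem_filter]; exact ⟨hk, by simp [ho]⟩
        · unfold pvCost
          rw [← ih k, ho]
          simp only [Option.map_some, Option.getD_some, pA_p_cost]
    rcases hres : PySem.List.min2? (pvRess arr (pvAent arr j) i) Prod.fst Prod.snd with _ | p
    · simp only [pvAent, hres, Option.map_none]
      have hnil := (pvMin2_none_iff _).mp hres
      rw [pvRess_eq] at hnil
      simp only [pvIsBest]
      rw [hcand]
      rw [List.filterMap_eq_nil_iff] at hnil
      rw [List.filter_eq_nil_iff]
      intro k hk
      have := hnil k hk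
      rcases ho : pvAent arr j k with _ | v
      · simp
      · rw [ho] at this; simp at this
    · simp only [pvAent, hres, Option.map_some]
      obtain ⟨hpin, hmin⟩ := pvMin2_some _ _ hres
      simp only [pvIsBest]
      constructor
      · exact ⟨p.2, (hmem p hpin).1, (hmem p hpin).2⟩
      · intro k hk
        -- k is a candidate: find the corresponding ress element
        rw [hcand, List.mem_filter] at hk
        rcases ho : pvAent arr j k with _ | v
        · rw [ho] at hk; simp at hk
        · have : (v.1 + pA_p arr (k + 1) i, k) ∈ pvRess arr (pvAent arr j) i := by
            rw [pvRess_eq]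
            apply List.mem_filterMap.mpr
            exact ⟨k, hk.1, by simp [ho]⟩
          have h1 := hmin _ this
          have h2 : pvCost arr (pvF arr j) i k = v.1 + pA_p arr (k + 1) i := by
            unfold pvCost
            rw [← ih k, ho]
            simp only [Option.map_some, Option.getD_some, pA_p_cost]
          omega

-- A's loops as standalone functions (definitional repackaging of the port's lambdas)
def pvAInner (arr : List Int) (i : Int)
    (f : PySem.Dict (Int × Int) (Int × Int)) (j : Int) : PySem.Dict (Int × Int) (Int × Int) :=
  let ress : List (Int × Int) :=
    (PySem.List.pyRange 0 i 1).foldl (fun ress k =>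
      match f.get? (k, j - 1) with
      | some lastv => ress ++ [(lastv.1 + pA_p arr (k + 1) i, k)]
      | none => ress) []
  if ress ≠ [] then
    f.insert (i, j) ((PySem.List.min2? ress Prod.fst Prod.snd).getD (0, 0))
  else f

def pvAOuter (arr : List Int) (m : Int)
    (f : PySem.Dict (Int × Int) (Int × Int)) (i : Int) : PySem.Dict (Int × Int) (Int × Int) :=
  (PySem.List.pyRange 1 (m + 1) 1).foldl (pvAInner arr i) f

def pvAfold (lengths : List Int) (m : Int) : PySem.Dict (Int × Int) (Int × Int) :=
  (PySem.List.pyRange 1 ((lengths.length : Int) + 1) 1).foldl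
    (pvAOuter (PySem.List.sorted lengths (fun x => x) false) m)
    (PySem.Dict.ofList [((0, 0), (0, 0))])

lemma get_baseline_py_eq (lengths : List Int) (m : Int) :
    get_baseline_py lengths m
      = (((pvAfold lengths m).get? ((lengths.length : Int), m)).getD (0, 0)).1 := rfl

def pvSpecGet (arr : List Int) (m : Int) (i0 ki kj : Int) : Option (Int × Int) :=
  if ki = 0 ∧ kj = 0 then some (0, 0)
  else if 0 ≤ ki ∧ ki ≤ i0 ∧ 0 ≤ kj ∧ kj ≤ m then pvAent arr kj.toNat ki else none

lemma pvInner_step (arr : List Int) (m : Int) (i0 i j0 : Int)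
    (f : PySem.Dict (Int × Int) (Int × Int))
    (hi : i = i0 + 1) (hi0 : 0 ≤ i0) (hj0 : 0 ≤ j0) (hj0m : j0 < m)
    (hf : ∀ ki kj, f.get? (ki, kj)
        = if ki = i ∧ 1 ≤ kj ∧ kj ≤ j0 then pvAent arr kj.toNat ki
          else pvSpecGet arr m i0 ki kj) :
    ∀ ki kj, (pvAInner arr i f (j0 + 1)).get? (ki, kj)
        = if ki = i ∧ 1 ≤ kj ∧ kj ≤ j0 + 1 then pvAent arr kj.toNat ki
          else pvSpecGet arr m i0 ki kj := by
  intro ki kj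
  have hress : (PySem.List.pyRange 0 i 1).foldl (fun ress k =>
      match f.get? (k, j0 + 1 - 1) with
      | some lastv => ress ++ [(lastv.1 + pA_p arr (k + 1) i, k)]
      | none => ress) [] = pvRess arr (pvAent arr j0.toNat) i := by
    unfold pvRess
    apply PySem.List.foldl_congr_mem
    intro acc k hk
    rw [PySem.List.mem_pyRange_one] at hk
    have hget : f.get? (k, j0 + 1 - 1) = pvAent arr j0.toNat k := by
      rw [hf]
      have h1 : ¬ (k = i ∧ 1 ≤ j0 + 1 - 1 ∧ j0 + 1 - 1 ≤ j0) := by omega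
      rw [if_neg h1]
      unfold pvSpecGet
      by_cases h0 : k = 0 ∧ j0 + 1 - 1 = 0
      · rw [if_pos h0]
        obtain ⟨rfl, hj0e⟩ := h0
        have hj00 : j0.toNat = 0 := by omega
        rw [hj00]
        simp [pvAent]
      · rw [if_neg h0]
        have h2 : 0 ≤ k ∧ k ≤ i0 ∧ 0 ≤ j0 + 1 - 1 ∧ j0 + 1 - 1 ≤ m := by omega
        rw [if_pos h2]
        congr 1
        omega
    rw [hget]
    rcases hA : pvAent arr j0.toNat k with _ | v <;> simp [pvRessStep, hA]
  unfold pvAInner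
  simp only [hress]
  have htoNat : (j0 + 1).toNat = j0.toNat + 1 := by omega
  by_cases hne : pvRess arr (pvAent arr j0.toNat) i ≠ []
  · rw [if_pos hne]
    rcases hmin : PySem.List.min2? (pvRess arr (pvAent arr j0.toNat) i) Prod.fst Prod.snd
      with _ | p
    · exact absurd ((pvMin2_none_iff _).mp hmin) hne
    have hAent : pvAent arr ((j0 + 1).toNat) i = some p := by
      rw [htoNat]; simpa [pvAent] using hmin
    by_cases hkey : ((ki, kj) : Int × Int) = (i, j0 + 1)
    · rw [PySem.Dict.get?_insert, if_pos hkey]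
      simp only [Prod.mk.injEq] at hkey
      obtain ⟨rfl, rfl⟩ := hkey
      rw [if_pos ⟨rfl, by omega, by omega⟩]
      rw [hAent]
      simp
    · rw [PySem.Dict.get?_insert, if_neg hkey, hf]
      simp only [Prod.mk.injEq, not_and] at hkey
      by_cases c1 : ki = i ∧ 1 ≤ kj ∧ kj ≤ j0
      · rw [if_pos c1, if_pos ⟨c1.1, c1.2.1, by omega⟩]
      · have c2 : ¬ (ki = i ∧ 1 ≤ kj ∧ kj ≤ j0 + 1) := by
          intro h
          rcases h with ⟨h1, h2, h3⟩
          have := hkey h1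
          omega
        rw [if_neg c1, if_neg c2]
  · rw [if_neg hne]
    rw [not_ne_iff] at hne
    rw [hf]
    have hnone : pvAent arr ((j0 + 1).toNat) i = none := by
      rw [htoNat]
      show PySem.List.min2? (pvRess arr (pvAent arr j0.toNat) i) Prod.fst Prod.snd = none
      rw [hne]
      rfl
    by_cases c1 : ki = i ∧ 1 ≤ kj ∧ kj ≤ j0
    · rw [if_pos c1, if_pos ⟨c1.1, c1.2.1, by omega⟩]
    · rw [if_neg c1]
      by_cases c2 : ki = i ∧ 1 ≤ kj ∧ kj ≤ j0 + 1
      · rw [if_pos c2]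
        have hkj : kj = j0 + 1 := by
          by_contra hx
          exact c1 ⟨c2.1, c2.2.1, by have := c2.2.2; omega⟩
        rw [c2.1, hkj, hnone]
        unfold pvSpecGet
        rw [if_neg (by omega), if_neg (by omega)]
      · rw [if_neg c2]

lemma pvRow_inv (arr : List Int) (m : Int) (i0 : Int) (f : PySem.Dict (Int × Int) (Int × Int))
    (hi0 : 0 ≤ i0)
    (hf : ∀ ki kj, f.get? (ki, kj) = pvSpecGet arr m i0 ki kj) :
    ∀ t : Nat, (t : Int) ≤ m →
      ∀ ki kj, ((PySem.List.pyRange 1 ((t : Int) + 1) 1).foldl (pvAInner arr (i0 + 1)) f).get? (ki, kj)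
        = if ki = i0 + 1 ∧ 1 ≤ kj ∧ kj ≤ (t : Int) then pvAent arr kj.toNat ki
          else pvSpecGet arr m i0 ki kj := by
  intro t
  induction t with
  | zero =>
    intro _ ki kj
    rw [PySem.List.pyRange_one_eq_nil (by omega)]
    simp only [List.foldl_nil]
    rw [hf, if_neg (by omega)]
  | succ t ih =>
    intro htm ki kj
    have hcast : ((t + 1 : Nat) : Int) = (t : Int) + 1 := by push_cast; ring
    have hsplit : PySem.List.pyRange 1 ((t : Int) + 1 + 1) 1
        = PySem.List.pyRange 1 ((t : Int) + 1) 1 ++ [(t : Int) + 1] := by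
      exact PySem.List.pyRange_one_succ_right (by omega)
    rw [hcast, hsplit, List.foldl_append]
    simp only [List.foldl_cons, List.foldl_nil]
    have := pvInner_step arr m i0 (i0 + 1) (t : Int)
      ((PySem.List.pyRange 1 ((t : Int) + 1) 1).foldl (pvAInner arr (i0 + 1)) f)
      rfl hi0 (by omega) (by omega) (ih (by omega))
    exact this ki kj

lemma pvOuter_inv (arr : List Int) (m : Int) (i0 : Int)
    (f : PySem.Dict (Int × Int) (Int × Int)) (hi0 : 0 ≤ i0)
    (hf : ∀ ki kj, f.get? (ki, kj) = pvSpecGet arr m i0 ki kj) :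
    ∀ ki kj, (pvAOuter arr m f (i0 + 1)).get? (ki, kj) = pvSpecGet arr m (i0 + 1) ki kj := by
  intro ki kj
  unfold pvAOuter
  by_cases hm : 0 ≤ m
  · have hmt : ((m.toNat : Nat) : Int) = m := by omega
    have h2 := pvRow_inv arr m i0 f hi0 hf m.toNat (by omega) ki kj
    rw [hmt] at h2
    rw [h2]
    by_cases c : ki = i0 + 1 ∧ 1 ≤ kj ∧ kj ≤ m
    · rw [if_pos c]
      unfold pvSpecGet
      rw [if_neg (by omega), if_pos (by omega)]
    · rw [if_neg c]
      unfold pvSpecGet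
      by_cases h00 : ki = 0 ∧ kj = 0
      · rw [if_pos h00, if_pos h00]
      · rw [if_neg h00, if_neg h00]
        by_cases c1 : 0 ≤ ki ∧ ki ≤ i0 ∧ 0 ≤ kj ∧ kj ≤ m
        · rw [if_pos c1, if_pos (by omega)]
        · by_cases c2 : 0 ≤ ki ∧ ki ≤ i0 + 1 ∧ 0 ≤ kj ∧ kj ≤ m
          · rw [if_neg c1, if_pos c2]
            -- here ki = i0 + 1 and kj = 0
            have hki : ki = i0 + 1 := by omega
            have hkj : kj = 0 := by omega
            subst hki; subst hkj
            show none = pvAent arr (0 : Int).toNat (i0 + 1)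
            simp [pvAent]
            omega
          · rw [if_neg c1, if_neg c2]
  · rw [PySem.List.pyRange_one_eq_nil (by omega), List.foldl_nil, hf]
    unfold pvSpecGet
    by_cases h00 : ki = 0 ∧ kj = 0
    · rw [if_pos h00, if_pos h00]
    · rw [if_neg h00, if_neg h00]
      by_cases c1 : 0 ≤ ki ∧ ki ≤ i0 ∧ 0 ≤ kj ∧ kj ≤ m
      · rw [if_pos c1, if_pos (by omega)]
      · rw [if_neg c1, if_neg (by omega)]

lemma pvAfold_inv (lengths : List Int) (m : Int) :
    ∀ ki kj, (pvAfold lengths m).get? (ki, kj)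
      = pvSpecGet (PySem.List.sorted lengths (fun x => x) false) m (lengths.length : Int) ki kj := by
  set arr := PySem.List.sorted lengths (fun x => x) false with harr
  have hD : PySem.Dict.ofList [(((0 : Int), (0 : Int)), ((0 : Int), (0 : Int)))]
      = PySem.Dict.mk [((0, 0), (0, 0))] := by decide
  have base : ∀ ki kj, (PySem.Dict.ofList [(((0 : Int), (0 : Int)), ((0 : Int), (0 : Int)))]).get? (ki, kj)
      = pvSpecGet arr m 0 ki kj := by
    intro ki kj
    rw [hD, PySem.Dict.get?_mk_cons]
    have hmtnone : (PySem.Dict.mk ([] : List ((Int × Int) × (Int × Int)))).get? (ki, kj) = none := by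
      simp [PySem.Dict.get?]
    unfold pvSpecGet
    by_cases hk : ki = 0 ∧ kj = 0
    · obtain ⟨rfl, rfl⟩ := hk
      have hb : ((((0 : Int), (0 : Int)) == ((0 : Int), (0 : Int))) = true) := by decide
      rw [hb, if_pos rfl, if_pos ⟨rfl, rfl⟩]
    · have hbeq : ((((0 : Int), (0 : Int)) == (ki, kj)) = false) := by
        simp only [beq_eq_false_iff_ne, ne_eq, Prod.mk.injEq, not_and]
        intro h1 h2
        exact hk ⟨h1.symm, h2.symm⟩
      rw [hbeq]
      simp only [Bool.false_eq_true, if_false]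
      rw [hmtnone, if_neg hk]
      by_cases c : 0 ≤ ki ∧ ki ≤ 0 ∧ 0 ≤ kj ∧ kj ≤ m
      · rw [if_pos c]
        have hki : ki = 0 := by omega
        subst hki
        have hkj1 : 1 ≤ kj := by omega
        have hkn : kj.toNat = kj.toNat - 1 + 1 := by omega
        rw [hkn]
        show none = PySem.List.min2? (pvRess arr (pvAent arr (kj.toNat - 1)) 0) Prod.fst Prod.snd
        rw [pvRess_eq, PySem.List.pyRange_one_eq_nil (by omega)]
        rfl
      · rw [if_neg c]
  have main : ∀ t : Nat, ∀ ki kj,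
      ((PySem.List.pyRange 1 ((t : Int) + 1) 1).foldl (pvAOuter arr m)
        (PySem.Dict.ofList [(((0 : Int), (0 : Int)), ((0 : Int), (0 : Int)))])).get? (ki, kj)
      = pvSpecGet arr m (t : Int) ki kj := by
    intro t
    induction t with
    | zero =>
      intro ki kj
      rw [PySem.List.pyRange_one_eq_nil (by omega), List.foldl_nil]
      exact base ki kj
    | succ t ih =>
      intro ki kj
      have hcast : ((t + 1 : Nat) : Int) = (t : Int) + 1 := by push_cast; ring
      have hsplit : PySem.List.pyRange 1 ((t : Int) + 1 + 1) 1
          = PySem.List.pyRange 1 ((t : Int) + 1) 1 ++ [(t : Int) + 1] := by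
        exact PySem.List.pyRange_one_succ_right (by omega)
      rw [hcast, hsplit, List.foldl_append]
      simp only [List.foldl_cons, List.foldl_nil]
      exact pvOuter_inv arr m (t : Int) _ (by omega) ih ki kj
  intro ki kj
  unfold pvAfold
  rw [← harr]
  exact main lengths.length ki kj

-- ===== B-side spec machinery =====
def pvPof (prev : List (Option Int)) (k : Int) : Option Int :=
  PySem.List.pyGetD prev k none

-- restricted candidates in [klo, b)
def pvCandR (P : Int → Option Int) (klo b : Int) : List Int :=
  (PySem.List.pyRange klo b 1).filter (fun k => (P k).isSome)

def pvBestSpec (arr : List Int) (P : Int → Option Int) (i : Int)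
    (cand : List Int) : Option Int × Option Int → Prop
  | (none, none) => cand = []
  | (some c, some k) => k ∈ cand ∧ pvCost arr P i k = c ∧
      (∀ k' ∈ cand, c ≤ pvCost arr P i k') ∧
      (∀ k' ∈ cand, pvCost arr P i k' = c → k' ≤ k)
  | _ => False

-- the largest optimal split point
def pvIsLArg (arr : List Int) (P : Int → Option Int) (i k : Int) : Prop :=
  k ∈ pvCand P i ∧ (∀ k' ∈ pvCand P i, pvCost arr P i k ≤ pvCost arr P i k') ∧
    ∀ k' ∈ pvCand P i, pvCost arr P i k' = pvCost arr P i k → k' ≤ k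

lemma pvCandR_snoc (P : Int → Option Int) (klo b : Int) (h : klo ≤ b) :
    pvCandR P klo (b + 1)
      = pvCandR P klo b ++ (if (P b).isSome then [b] else []) := by
  unfold pvCandR
  rw [PySem.List.pyRange_one_succ_right h, List.filter_append]
  by_cases hb : (P b).isSome <;> simp [hb]

lemma pvCandR_lt (P : Int → Option Int) (klo b k : Int) (h : k ∈ pvCandR P klo b) :
    klo ≤ k ∧ k < b ∧ (P k).isSome := by
  unfold pvCandR at h
  rw [List.mem_filter] at h
  rw [PySem.List.mem_pyRange_one] at h
  exact ⟨h.1.1, h.1.2, by simpa using h.2⟩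

lemma pvPof_eq (prev : List (Option Int)) (k : Int) :
    PySem.List.pyGetD prev k none = pvPof prev k := rfl

lemma pB_step_spec (prev : List (Option Int)) (arr : List Int) (i : Int)
    (cand : List Int) (bb : Option Int × Option Int) (k : Int)
    (hspec : pvBestSpec arr (pvPof prev) i cand bb)
    (hlt : ∀ k' ∈ cand, k' < k) :
    pvBestSpec arr (pvPof prev) i
      (cand ++ (if (pvPof prev k).isSome then [k] else []))
      (pB_bestStep prev arr i bb k) := by
  rcases hP : pvPof prev k with _ | pk
  · have e : pB_bestStep prev arr i bb k = bb := by
      unfold pB_bestStep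
      rw [pvPof_eq, hP]
    rw [e]
    simpa using hspec
  · have hcost : pvCost arr (pvPof prev) i k
        = pk + PySem.List.pyGetD arr (i - 1) 0 * (i - k) := by
      unfold pvCost
      rw [hP]
      rfl
    rcases bb with ⟨_ | bc, _ | kb⟩
    · -- (none, none): cand empty
      have hcand : cand = [] := hspec
      have e : pB_bestStep prev arr i (none, none) k
          = (some (pk + PySem.List.pyGetD arr (i - 1) 0 * (i - k)), some k) := by
        unfold pB_bestStep
        rw [pvPof_eq, hP]
      rw [e, hcand]
      simp only [Option.isSome_some, if_true, List.nil_append]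
      exact ⟨by simp, hcost.symm ▸ rfl, by
        intro k' hk'; simp at hk'; subst hk'; omega, by
        intro k' hk' _; simp at hk'; omega⟩
    · exact absurd hspec (by simp [pvBestSpec])
    · exact absurd hspec (by simp [pvBestSpec])
    · obtain ⟨hmem, hcostb, hmin, hties⟩ := hspec
      have e : pB_bestStep prev arr i (some bc, some kb) k
          = if pk + PySem.List.pyGetD arr (i - 1) 0 * (i - k) ≤ bc
            then (some (pk + PySem.List.pyGetD arr (i - 1) 0 * (i - k)), some k)
            else (some bc, some kb) := by
        unfold pB_bestStep
        rw [pvPof_eq, hP]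
      rw [e]
      simp only [Option.isSome_some, if_true]
      split_ifs with hle
    
      · refine ⟨by simp, by rw [hcost], ?_, ?_⟩
        · intro k' hk'
          rcases List.mem_append.mp hk' with h | h
          · exact le_trans hle (hmin k' h)
          · simp at h; subst h; omega
        · intro k' hk' _
          rcases List.mem_append.mp hk' with h | h
          · exact le_of_lt (hlt k' h)
          · simp at h; omega
      · refine ⟨List.mem_append_left _ hmem, hcostb, ?_, ?_⟩
        · intro k' hk'
          rcases List.mem_append.mp hk' with h | h
          · exact hmin k' h
          · simp at h; subst h; omega
        · intro k' hk' heq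
          rcases List.mem_append.mp hk' with h | h
          · exact hties k' h heq
          · simp at h; subst h; rw [hcost] at heq; omega

lemma pB_fold_spec (prev : List (Option Int)) (arr : List Int) (i klo : Int) :
    ∀ b : Int,
      pvBestSpec arr (pvPof prev) i (pvCandR (pvPof prev) klo b)
        ((PySem.List.pyRange klo b 1).foldl (pB_bestStep prev arr i) (none, none)) := by
  have hnil : ∀ b : Int, b ≤ klo →
      pvBestSpec arr (pvPof prev) i (pvCandR (pvPof prev) klo b)
        ((PySem.List.pyRange klo b 1).foldl (pB_bestStep prev arr i) (none, none)) := by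
    intro b hb
    rw [PySem.List.pyRange_one_eq_nil hb]
    have h2 : pvCandR (pvPof prev) klo b = [] := by
      unfold pvCandR
      rw [PySem.List.pyRange_one_eq_nil hb]
      rfl
    rw [h2]
    simp [pvBestSpec]
  intro b
  by_cases hb : b ≤ klo
  · exact hnil b hb
  · push_neg at hb
    obtain ⟨d, hd⟩ : ∃ d : Nat, b = klo + (d : Int) := ⟨(b - klo).toNat, by omega⟩
    subst hd
    clear hb
    induction d with
    | zero => exact hnil _ (by omega)
    | succ d ih =>
      have hcast : ((d + 1 : Nat) : Int) = (d : Int) + 1 := by push_cast; ring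
      have hsplit : PySem.List.pyRange klo (klo + ((d : Int) + 1)) 1
          = PySem.List.pyRange klo (klo + (d : Int)) 1 ++ [klo + (d : Int)] := by
        rw [show klo + ((d : Int) + 1) = (klo + (d : Int)) + 1 by ring]
        exact PySem.List.pyRange_one_succ_right (by omega)
      rw [hcast, hsplit, List.foldl_append]
      simp only [List.foldl_cons, List.foldl_nil]
      have hc : pvCandR (pvPof prev) klo (klo + ((d : Int) + 1))
          = pvCandR (pvPof prev) klo (klo + (d : Int))
            ++ (if (pvPof prev (klo + (d : Int))).isSome then [klo + (d : Int)] else []) := by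
        rw [show klo + ((d : Int) + 1) = (klo + (d : Int)) + 1 by ring]
        exact pvCandR_snoc _ _ _ (by omega)
      rw [hc]
      apply pB_step_spec
      · exact ih
      · intro k' hk'
        exact (pvCandR_lt _ _ _ _ hk').2.1

lemma pvCand_mem (P : Int → Option Int) (i k : Int) :
    k ∈ pvCand P i ↔ (0 ≤ k ∧ k < i ∧ (P k).isSome) := by
  unfold pvCand
  rw [List.mem_filter, PySem.List.mem_pyRange_one]
  simp [and_assoc]

lemma pvCandR_sub (P : Int → Option Int) (i klo khi k : Int) (hkl : 0 ≤ klo)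
    (h : k ∈ pvCandR P klo (min khi (i - 1) + 1)) : k ∈ pvCand P i := by
  obtain ⟨h1, h2, h3⟩ := pvCandR_lt _ _ _ _ h
  rw [pvCand_mem]
  exact ⟨by omega, by omega, h3⟩

lemma pvCandR_of_cand (P : Int → Option Int) (i klo khi k : Int)
    (hk : k ∈ pvCand P i) (h1 : klo ≤ k) (h2 : k ≤ khi) :
    k ∈ pvCandR P klo (min khi (i - 1) + 1) := by
  rw [pvCand_mem] at hk
  unfold pvCandR
  rw [List.mem_filter, PySem.List.mem_pyRange_one]
  exact ⟨⟨h1, by omega⟩, by simp [hk.2.2]⟩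

lemma pyRange_one_pairwise (a : Int) : ∀ d : Nat, (PySem.List.pyRange a (a + (d : Int)) 1).Pairwise (· < ·) := by
  intro d
  induction d with
  | zero => rw [PySem.List.pyRange_one_eq_nil (by omega)]; simp
  | succ d ih =>
    have hcast : ((d + 1 : Nat) : Int) = (d : Int) + 1 := by push_cast; ring
    rw [hcast, show a + ((d : Int) + 1) = (a + (d : Int)) + 1 by ring,
      PySem.List.pyRange_one_succ_right (by omega)]
    rw [List.pairwise_append]
    refine ⟨ih, by simp, ?_⟩
    intro x hx y hy
    rw [PySem.List.mem_pyRange_one] at hx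
    simp at hy
    omega

lemma pvCand_pairwise (P : Int → Option Int) (i : Int) : (pvCand P i).Pairwise (· < ·) := by
  unfold pvCand
  apply List.Pairwise.filter
  by_cases hi : 0 ≤ i
  · have : i = 0 + (i.toNat : Int) := by omega
    rw [this]
    exact pyRange_one_pairwise 0 i.toNat
  · rw [PySem.List.pyRange_one_eq_nil (by omega)]
    simp

lemma exists_largest_argmin (f : Int → Int) :
    ∀ (l : List Int), l ≠ [] → l.Pairwise (· < ·) →
      ∃ k ∈ l, (∀ k' ∈ l, f k ≤ f k') ∧ (∀ k' ∈ l, f k' = f k → k' ≤ k) := by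
  intro l
  induction l with
  | nil => simp
  | cons a t ih =>
    intro _ hp
    rcases List.pairwise_cons.mp hp with ⟨ha, ht⟩
    by_cases htn : t = []
    · subst htn
      exact ⟨a, by simp, by simp, by simp⟩
    · obtain ⟨k, hk, hmin, hties⟩ := ih htn ht
      by_cases hfk : f k ≤ f a
      · refine ⟨k, List.mem_cons_of_mem _ hk, ?_, ?_⟩
        · intro k' hk'
          rcases List.mem_cons.mp hk' with rfl | h
          · exact hfk
          · exact hmin k' h
        · intro k' hk' _
          rcases List.mem_cons.mp hk' with rfl | h
          · exact le_of_lt (ha k hk)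
          · exact hties k' h ‹f k' = f k›
      · push_neg at hfk
        refine ⟨a, by simp, ?_, ?_⟩
        · intro k' hk'
          rcases List.mem_cons.mp hk' with rfl | h
          · exact le_refl _
          · exact le_trans (le_of_lt hfk) (hmin k' h)
        · intro k' hk' heq
          rcases List.mem_cons.mp hk' with rfl | h
          · exact le_refl _
          · have := hmin k' h
            have := hfk
            omega

lemma pvIsLArg_exists (arr : List Int) (P : Int → Option Int) (i : Int)
    (h : pvCand P i ≠ []) : ∃ k, pvIsLArg arr P i k := by
  obtain ⟨k, hk, hmin, hties⟩ :=
    exists_largest_argmin (pvCost arr P i) (pvCand P i) h (pvCand_pairwise P i)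
  exact ⟨k, hk, hmin, hties⟩

lemma pB_best_empty (prev : List (Option Int)) (arr : List Int) (i klo khi : Int)
    (hkl : 0 ≤ klo) (hc : pvCand (pvPof prev) i = []) :
    pB_best prev arr i klo khi = (none, none) := by
  have hspec := pB_fold_spec prev arr i klo (min khi (i - 1) + 1)
  rcases hr : (PySem.List.pyRange klo (min khi (i - 1) + 1) 1).foldl
      (pB_bestStep prev arr i) (none, none) with ⟨_ | c, _ | k⟩
  · exact hr
  all_goals rw [hr] at hspec
  · exact absurd hspec (by simp [pvBestSpec])
  · exact absurd hspec (by simp [pvBestSpec])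
  · obtain ⟨hmem, _, _, _⟩ := hspec
    have := pvCandR_sub (pvPof prev) i klo khi k hkl hmem
    rw [hc] at this
    simp at this
lemma pB_best_larg (prev : List (Option Int)) (arr : List Int) (i klo khi kst : Int)
    (hkl : 0 ≤ klo) (hl : pvIsLArg arr (pvPof prev) i kst)
    (h1 : klo ≤ kst) (h2 : kst ≤ khi) :
    pB_best prev arr i klo khi = (some (pvCost arr (pvPof prev) i kst), some kst) := by
  have hspec := pB_fold_spec prev arr i klo (min khi (i - 1) + 1)
  have hkR : kst ∈ pvCandR (pvPof prev) klo (min khi (i - 1) + 1) :=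
    pvCandR_of_cand _ _ _ _ _ hl.1 h1 h2
  rcases hr : (PySem.List.pyRange klo (min khi (i - 1) + 1) 1).foldl
      (pB_bestStep prev arr i) (none, none) with ⟨_ | c, _ | k⟩ <;> rw [hr] at hspec
  · rw [show (pvBestSpec arr (pvPof prev) i (pvCandR (pvPof prev) klo (min khi (i-1) + 1)) (none, none)) = (pvCandR (pvPof prev) klo (min khi (i-1) + 1) = []) from rfl] at hspec
    rw [hspec] at hkR
    simp at hkR
  · exact absurd hspec (by simp [pvBestSpec])
  · exact absurd hspec (by simp [pvBestSpec])
  · obtain ⟨hmem, hcost, hmin, hties⟩ := hspec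
    obtain ⟨hkm, hkmin, hkties⟩ := hl
    have hsub := pvCandR_sub (pvPof prev) i klo khi k hkl hmem
    have e1 : c = pvCost arr (pvPof prev) i kst := by
      have a1 := hmin kst hkR
      have a2 := hkmin k hsub
      omega
    have e2 : k = kst := by
      have b1 := hkties k hsub (by omega)
      have b2 := hties kst hkR (by omega)
      omega
    rw [pB_best, hr, e1, e2]

-- quadrangle / exchange argument: the largest optimal split point is monotone in i
lemma pvLArg_mono (arr : List Int) (P : Int → Option Int) (i1 i2 k1 k2 : Int)
    (harr : ∀ p q : Int, 1 ≤ p → p ≤ q → q ≤ (arr.length : Int) →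
      PySem.List.pyGetD arr (p - 1) 0 ≤ PySem.List.pyGetD arr (q - 1) 0)
    (h1n : 1 ≤ i1) (hii : i1 ≤ i2) (hi2 : i2 ≤ (arr.length : Int))
    (hl1 : pvIsLArg arr P i1 k1) (hl2 : pvIsLArg arr P i2 k2) : k1 ≤ k2 := by
  by_contra hcon
  push_neg at hcon   -- k2 < k1
  obtain ⟨m1, min1, t1⟩ := hl1
  obtain ⟨m2, min2, t2⟩ := hl2
  rw [pvCand_mem] at m1 m2
  have hk2m1 : k2 ∈ pvCand P i1 := by
    rw [pvCand_mem]
    exact ⟨m2.1, by omega, m2.2.2⟩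
  have hk1m2 : k1 ∈ pvCand P i2 := by
    rw [pvCand_mem]
    exact ⟨m1.1, by omega, m1.2.2⟩
  have hA := min1 k2 hk2m1   -- cost i1 k1 ≤ cost i1 k2
  have hg := harr i1 i2 h1n hii hi2
  -- exchange: cost i2 k1 ≤ cost i2 k2
  have hx : pvCost arr P i2 k1 ≤ pvCost arr P i2 k2 := by
    unfold pvCost at hA ⊢
    have hg' : (PySem.List.pyGet? arr (i1 - 1)).getD 0 ≤ (PySem.List.pyGet? arr (i2 - 1)).getD 0 := hg
    nlinarith [hA, hg', hcon]
  have hB := min2 k1 hk1m2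
  have := t2 k1 hk1m2 (by omega)
  omega

lemma pyGetD_pySetD' (cur : List (Option Int)) (mid i : Int) (v : Option Int)
    (hm : 0 ≤ mid) (hml : mid < (cur.length : Int)) (hi : 0 ≤ i) :
    PySem.List.pyGetD (PySem.List.pySetD cur mid v) i none
      = if i = mid then v else PySem.List.pyGetD cur i none := by
  have h1 : mid = ((mid.toNat : Nat) : Int) := by omega
  have h2 : i = ((i.toNat : Nat) : Int) := by omega
  rw [h1, h2, PySem.List.pyGetD_pySetD_natCast cur mid.toNat i.toNat v none (by omega)]
  by_cases h : i.toNat = mid.toNat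
  · rw [if_pos h, if_pos (by omega)]
  · rw [if_neg h, if_neg (by omega)]

lemma pB_solve_go (prev : List (Option Int)) (arr : List Int) :
    ∀ (d : Nat) (cur : List (Option Int)) (ilo ihi klo khi : Int),
    (ihi + 1 - ilo).toNat ≤ d →
    0 ≤ klo → 0 ≤ ilo → ihi < (cur.length : Int) →
    (∀ i k, ilo ≤ i → i ≤ ihi → pvIsLArg arr (pvPof prev) i k → klo ≤ k ∧ k ≤ khi) →
    (∀ i1 i2 k1 k2, ilo ≤ i1 → i1 ≤ i2 → i2 ≤ ihi →
        pvIsLArg arr (pvPof prev) i1 k1 → pvIsLArg arr (pvPof prev) i2 k2 → k1 ≤ k2) →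
    ((pB_solve prev arr cur ilo ihi klo khi).length = cur.length ∧
     (∀ i : Int, 0 ≤ i → (i < ilo ∨ ihi < i) →
        PySem.List.pyGetD (pB_solve prev arr cur ilo ihi klo khi) i none
          = PySem.List.pyGetD cur i none) ∧
     (∀ i : Int, ilo ≤ i → i ≤ ihi →
        pvIsBest arr (pvPof prev) i
          (PySem.List.pyGetD (pB_solve prev arr cur ilo ihi klo khi) i none))) := by
  intro d
  induction d with
  | zero =>
    intro cur ilo ihi klo khi hd _ _ _ _ _
    have hgt : ilo > ihi := by omega
    rw [pB_solve, dif_pos hgt]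
    exact ⟨rfl, fun _ _ _ => rfl, fun i h1 h2 => by omega⟩
  | succ d ih =>
    intro cur ilo ihi klo khi hd hkl hil hlen hinv hmono
    by_cases hgt : ilo > ihi
    · rw [pB_solve, dif_pos hgt]
      exact ⟨rfl, fun _ _ _ => rfl, fun i h1 h2 => by omega⟩
    · have hle : ilo ≤ ihi := by omega
      have hmid := PySem.Int.floordiv_two_mid_bounds (lo := ilo) (hi := ihi) hle
      set mid := PySem.Int.floordiv (ilo + ihi) 2 with hmiddef
      rw [pB_solve, dif_neg hgt]
      simp only [← hmiddef]
      -- case on whether state mid has any candidate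
      by_cases hc : pvCand (pvPof prev) mid = []
      · rw [pB_best_empty prev arr mid klo khi hkl hc]
        simp only [Option.getD_none]
        have hlen1 : (PySem.List.pySetD cur mid none).length = cur.length :=
          PySem.List.length_pySetD cur mid none
        have hIHL := ih (PySem.List.pySetD cur mid none) ilo (mid - 1) klo klo
          (by omega) hkl hil (by omega)
          (by
            intro i k h1 h2 hL
            exfalso
            have hm1 := hL.1
            rw [pvCand_mem] at hm1
            have : k ∈ pvCand (pvPof prev) mid := by
              rw [pvCand_mem]; exact ⟨hm1.1, by omega, hm1.2.2⟩
            rw [hc] at this; simp at this)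
          (by
            intro i1 i2 k1 k2 h1 h2 h3 hL1 hL2
            exact hmono i1 i2 k1 k2 h1 h2 (by omega) hL1 hL2)
        obtain ⟨hL1, hL2, hL3⟩ := hIHL
        have hIHR := ih (pB_solve prev arr (PySem.List.pySetD cur mid none) ilo (mid - 1) klo klo)
          (mid + 1) ihi klo khi (by omega) hkl (by omega) (by omega)
          (by
            intro i k h1 h2 hL
            exact hinv i k (by omega) h2 hL)
          (by
            intro i1 i2 k1 k2 h1 h2 h3 hL1 hL2
            exact hmono i1 i2 k1 k2 (by omega) h2 h3 hL1 hL2)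
        obtain ⟨hR1, hR2, hR3⟩ := hIHR
        refine ⟨by omega, ?_, ?_⟩
        · intro i hi0 hio
          rw [hR2 i hi0 (by omega), hL2 i hi0 (by omega),
            pyGetD_pySetD' cur mid i none (by omega) (by omega) hi0, if_neg (by omega)]
        · intro i h1 h2
          rcases lt_trichotomy i mid with hlt | heq | hgt2
          · rw [hR2 i (by omega) (by omega)]
            exact hL3 i h1 (by omega)
          · rw [heq]
            rw [hR2 mid (by omega) (by omega), hL2 mid (by omega) (by omega),
              pyGetD_pySetD' cur mid mid none (by omega) (by omega) (by omega), if_pos rfl]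
            exact hc
          · exact hR3 i (by omega) h2
      · obtain ⟨kst, hkst⟩ := pvIsLArg_exists arr (pvPof prev) mid hc
        obtain ⟨hklo, hkhi⟩ := hinv mid kst (by omega) (by omega) hkst
        rw [pB_best_larg prev arr mid klo khi kst hkl hkst hklo hkhi]
        simp only [Option.getD_some]
        have hlen1 : (PySem.List.pySetD cur mid (some (pvCost arr (pvPof prev) mid kst))).length
            = cur.length := PySem.List.length_pySetD _ _ _
        have hIHL := ih (PySem.List.pySetD cur mid (some (pvCost arr (pvPof prev) mid kst)))
          ilo (mid - 1) klo kst (by omega) hkl hil (by omega)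
          (by
            intro i k h1 h2 hL
            refine ⟨(hinv i k h1 (by omega) hL).1, ?_⟩
            exact hmono i mid k kst (by omega) (by omega) (by omega) hL hkst)
          (by
            intro i1 i2 k1 k2 h1 h2 h3 hL1 hL2
            exact hmono i1 i2 k1 k2 h1 h2 (by omega) hL1 hL2)
        obtain ⟨hL1, hL2, hL3⟩ := hIHL
        have hIHR := ih (pB_solve prev arr
            (PySem.List.pySetD cur mid (some (pvCost arr (pvPof prev) mid kst)))
            ilo (mid - 1) klo kst)
          (mid + 1) ihi kst khi (by omega) (by omega) (by omega) (by omega)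
          (by
            intro i k h1 h2 hL
            refine ⟨?_, (hinv i k (by omega) h2 hL).2⟩
            exact hmono mid i kst k (by omega) (by omega) h2 hkst hL)
          (by
            intro i1 i2 k1 k2 h1 h2 h3 hL1 hL2
            exact hmono i1 i2 k1 k2 (by omega) h2 h3 hL1 hL2)
        obtain ⟨hR1, hR2, hR3⟩ := hIHR
        refine ⟨by omega, ?_, ?_⟩
        · intro i hi0 hio
          rw [hR2 i hi0 (by omega), hL2 i hi0 (by omega),
            pyGetD_pySetD' cur mid i _ (by omega) (by omega) hi0, if_neg (by omega)]
        · intro i h1 h2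
          rcases lt_trichotomy i mid with hlt | heq | hgt2
          · rw [hR2 i (by omega) (by omega)]
            exact hL3 i h1 (by omega)
          · rw [heq]
            rw [hR2 mid (by omega) (by omega), hL2 mid (by omega) (by omega),
              pyGetD_pySetD' cur mid mid _ (by omega) (by omega) (by omega), if_pos rfl]
            obtain ⟨hm, hmin, _⟩ := hkst
            exact ⟨⟨kst, hm, rfl⟩, hmin⟩
          · exact hR3 i (by omega) h2

lemma pvIsBest_congr (arr : List Int) (P P' : Int → Option Int) (i : Int) (o : Option Int)
    (h : ∀ k, 0 ≤ k → k < i → P k = P' k) (hb : pvIsBest arr P i o) : pvIsBest arr P' i o := by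
  have hcand : pvCand P i = pvCand P' i := by
    unfold pvCand
    apply List.filter_congr
    intro k hk
    rw [PySem.List.mem_pyRange_one] at hk
    rw [h k hk.1 hk.2]
  have hcost : ∀ k ∈ pvCand P' i, pvCost arr P i k = pvCost arr P' i k := by
    intro k hk
    rw [pvCand_mem] at hk
    unfold pvCost
    rw [h k hk.1 hk.2.1]
  rcases o with _ | c
  · simp only [pvIsBest] at hb ⊢
    rw [← hcand]
    exact hb
  · simp only [pvIsBest] at hb ⊢
    obtain ⟨⟨k, hk, hkc⟩, hmin⟩ := hb
    rw [hcand] at hk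
    refine ⟨⟨k, hk, by rw [← hcost k hk]; exact hkc⟩, ?_⟩
    intro k' hk'
    rw [← hcost k' hk']
    exact hmin k' (hcand ▸ hk')

-- one layer of B: solve on the full range, relating prev (= pvF arr j) to pvF arr (j+1)
lemma pB_layer (lengths : List Int) (j : Nat) (prev : List (Option Int)) :
    ∀ (harr : List Int), harr = PySem.List.sorted lengths (fun x => x) false →
    prev.length = harr.length + 1 →
    (∀ k : Int, 0 ≤ k → k ≤ (harr.length : Int) → pvPof prev k = pvF harr j k) →
    ((pB_solve prev harr (List.replicate (harr.length + 1) none) 1 (harr.length : Int) 0 (harr.length : Int)).length = harr.length + 1 ∧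
     (∀ k : Int, 0 ≤ k → k ≤ (harr.length : Int) →
        pvPof (pB_solve prev harr (List.replicate (harr.length + 1) none) 1 (harr.length : Int) 0 (harr.length : Int)) k
          = pvF harr (j + 1) k)) := by
  intro arr harrdef hlen hP
  subst harrdef
  set arr := PySem.List.sorted lengths (fun x => x) false with harrdef
  have hsorted : ∀ p q : Int, 1 ≤ p → p ≤ q → q ≤ (arr.length : Int) →
      PySem.List.pyGetD arr (p - 1) 0 ≤ PySem.List.pyGetD arr (q - 1) 0 := by
    intro p q hp hpq hq
    rw [PySem.List.pyGetD_eq_getElem arr 0 (by omega) (by omega),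
      PySem.List.pyGetD_eq_getElem arr 0 (by omega) (by omega)]
    have := PySem.List.sorted_id_getElem_mono (xs := lengths)
      (p := (p - 1).toNat) (q := (q - 1).toNat) (by omega)
      (by
        have hl : (PySem.List.sorted lengths (fun x => x) false).length = lengths.length :=
          (PySem.List.sorted_perm lengths (fun x => x) false).length_eq
        rw [← harrdef] at *
        omega)
    exact this
  have hgo := pB_solve_go prev arr ((arr.length : Int) + 1 - 1).toNat
    (List.replicate (arr.length + 1) none) 1 (arr.length : Int) 0 (arr.length : Int)
    (by omega) (by omega) (by omega) (by simp)
    (by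
      intro i k h1 h2 hL
      have := hL.1
      rw [pvCand_mem] at this
      omega)
    (by
      intro i1 i2 k1 k2 h1 h2 h3 hL1 hL2
      exact pvLArg_mono arr (pvPof prev) i1 i2 k1 k2 hsorted (by omega) h2 h3 hL1 hL2)
  obtain ⟨hg1, hg2, hg3⟩ := hgo
  constructor
  · rw [hg1]; simp
  · intro k hk0 hkn
    by_cases hk1 : 1 ≤ k
    · have hbest := hg3 k hk1 hkn
      have hbest' := pvIsBest_congr arr (pvPof prev) (pvF arr j) k _
        (fun k' h1 h2 => hP k' h1 (by omega)) hbest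
      exact pvIsBest_unique arr (pvF arr j) k _ _ hbest' (pvIsBest_pvF arr j k)
    · have hk0' : k = 0 := by omega
      subst hk0'
      have := hg2 0 (by omega) (by omega)
      show pvPof _ 0 = _
      unfold pvPof at this ⊢
      rw [this]
      have hrep : PySem.List.pyGetD (List.replicate (arr.length + 1) (none : Option Int)) 0 none = none := by
        rw [PySem.List.pyGetD_eq_getElem _ _ (by omega) (by simp)]
        simp
      rw [hrep]
      have : pvF arr (j + 1) 0 = none := by
        simp only [pvF]
        rw [PySem.List.min?_eq_none_iff]
        unfold pvCand
        rw [PySem.List.pyRange_one_eq_nil (by omega)]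
        rfl
      rw [this]


-- ===== B-side final: the layered fold computes pvF =====
def pvBfold (lengths : List Int) (m : Int) : List (Option Int) :=
  let arr : List Int := PySem.List.sorted lengths (fun x => x) false
  let n : Int := arr.length
  let prev0 : List (Option Int) := some 0 :: List.replicate n.toNat none
  (PySem.List.pyRange 1 (m + 1) 1).foldl
    (fun prev _j => pB_solve prev arr (List.replicate (n.toNat + 1) none) 1 n 0 n) prev0

lemma get_baseline_py_alt_eq (lengths : List Int) (m : Int) :
    get_baseline_py_alt lengths m
      = (PySem.List.pyGetD (pvBfold lengths m)
          ((PySem.List.sorted lengths (fun x => x) false).length : Int) none).getD 0 := rfl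

lemma pvBfold_inv (lengths : List Int) (m : Int) (hm : 0 ≤ m) :
    ∀ k : Int, 0 ≤ k → k ≤ ((PySem.List.sorted lengths (fun x => x) false).length : Int) →
      pvPof (pvBfold lengths m) k
        = pvF (PySem.List.sorted lengths (fun x => x) false) m.toNat k := by
  set arr := PySem.List.sorted lengths (fun x => x) false with harr
  have hnt : ((arr.length : Int)).toNat = arr.length := by omega
  have base_len : (some (0 : Int) :: List.replicate ((arr.length : Int)).toNat (none : Option Int)).length
      = arr.length + 1 := by simp [hnt]
  have base_val : ∀ k : Int, 0 ≤ k → k ≤ (arr.length : Int) →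
      pvPof (some 0 :: List.replicate ((arr.length : Int)).toNat (none : Option Int)) k
        = pvF arr 0 k := by
    intro k h0 hk
    unfold pvPof
    rw [PySem.List.pyGetD_eq_getElem _ _ h0 (by simp [hnt]; omega)]
    by_cases hk0 : k = 0
    · subst hk0
      simp [pvF]
    · rw [List.getElem_cons]
      rw [dif_neg (by omega)]
      simp only [List.getElem_replicate]
      simp [pvF]
      omega
  have main : ∀ t : Nat,
      (((PySem.List.pyRange 1 ((t : Int) + 1) 1).foldl
        (fun prev _j => pB_solve prev arr (List.replicate (((arr.length : Int)).toNat + 1) none)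
          1 (arr.length : Int) 0 (arr.length : Int))
        (some 0 :: List.replicate ((arr.length : Int)).toNat none)).length = arr.length + 1
      ∧ ∀ k : Int, 0 ≤ k → k ≤ (arr.length : Int) →
        pvPof ((PySem.List.pyRange 1 ((t : Int) + 1) 1).foldl
          (fun prev _j => pB_solve prev arr (List.replicate (((arr.length : Int)).toNat + 1) none)
            1 (arr.length : Int) 0 (arr.length : Int))
          (some 0 :: List.replicate ((arr.length : Int)).toNat none)) k = pvF arr t k) := by
    intro t
    induction t with
    | zero =>
      rw [PySem.List.pyRange_one_eq_nil (by omega)]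
      exact ⟨base_len, base_val⟩
    | succ t ih =>
      have hcast : ((t + 1 : Nat) : Int) = (t : Int) + 1 := by push_cast; ring
      have hsplit : PySem.List.pyRange 1 ((t : Int) + 1 + 1) 1
          = PySem.List.pyRange 1 ((t : Int) + 1) 1 ++ [(t : Int) + 1] := by
        exact PySem.List.pyRange_one_succ_right (by omega)
      rw [hcast, hsplit, List.foldl_append]
      simp only [List.foldl_cons, List.foldl_nil]
      obtain ⟨ih1, ih2⟩ := ih
      have := pB_layer lengths t _ arr harr ih1 ih2
      rw [hnt]
      exact ⟨this.1, this.2⟩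
  intro k h0 hk
  unfold pvBfold
  rw [← harr]
  have hmt : ((m.toNat : Nat) : Int) = m := by omega
  have h := (main m.toNat).2 k h0 hk
  rw [hmt] at h
  exact h

-- ===== VERDICT (by name: the statement is the Claim_ definition above) =====
theorem get_baseline_py_spec : Claim_equal_get_baseline_py := by
  unfold Claim_equal_get_baseline_py
  intro lengths m _ hpre
  unfold Spec_get_baseline_py
  set arr := PySem.List.sorted lengths (fun x => x) false with harr
  have hlenarr : arr.length = lengths.length :=
    (PySem.List.sorted_perm lengths (fun x => x) false).length_eq
  have hm : 0 ≤ m := by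
    rcases hpre with ⟨_, rfl⟩ | ⟨h, _⟩ <;> omega
  rw [get_baseline_py_eq, get_baseline_py_alt_eq, ← harr]
  rw [pvAfold_inv lengths m (lengths.length : Int) m, ← harr]
  have hB0 := pvBfold_inv lengths m hm
  rw [← harr] at hB0
  have hB := hB0 (arr.length : Int) (by omega) (by omega)
  unfold pvPof at hB
  rw [hB]
  rcases hpre with ⟨hnil, hm0⟩ | ⟨hm1, hmn⟩
  · subst hm0
    have hl0 : lengths.length = 0 := by rw [hnil]; rfl
    unfold pvSpecGet
    rw [if_pos ⟨by omega, rfl⟩]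
    have : (arr.length : Int) = 0 := by omega
    rw [this]
    simp [pvF]
  · unfold pvSpecGet
    have hn1 : 1 ≤ (lengths.length : Int) := by omega
    rw [if_neg (by omega), if_pos ⟨by omega, by omega, by omega, by omega⟩]
    have he : (lengths.length : Int) = (arr.length : Int) := by omega
    rw [he]
    have := pvAent_fst arr m.toNat (arr.length : Int)
    rcases hA : pvAent arr m.toNat (arr.length : Int) with _ | p
    · rw [hA] at this
      rw [← this]
      simp
    · rw [hA] at this
      rw [← this]
      simp
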